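-- pv_equiv track=rewrite | github.com/pblynn/Number-Base-Conversion | Decimal to Binary,Oct,Hex.py | dec_to_binocthex
-- ===== SOURCE A (Python) =====
-- def dec_to_binocthex(num,base):
--     hexmap= {0:0, 1:1, 2:2, 3:3, 4:4, 5:5, 6:6, 7:7, 8:8, 9:9, 10:'A', 11:'B', 12:'C', 13:'D',14:'E',15:'F'}
--     result= ""
--     quotient= num
--     while quotient > 0:
--         remainder= quotient % base
--         quotient= quotient // base
--         result= str(hexmap[remainder]) + result
--     return result
-- ===== SOURCE B (Python) =====
-- def dec_to_binocthex(num, base):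
--     if num <= 0:
--         return ""
--     return dec_to_binocthex(num // base, base) + "0123456789ABCDEF"[num % base]
-- ===== Notes on version B (the rewrite author's own statement) =====
-- stated objective: simpler
-- what changed: Replaces the while-loop with a dict lookup and string prepending by a two-line recursion over the quotient that appends digits most-significant-first via the call stack, indexing a digit-string literal instead of the hexmap dict.
-- outside the precondition, e.g. on dec_to_binocthex(21, 17): A returns '14', B returns '14'
import Mathlib
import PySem

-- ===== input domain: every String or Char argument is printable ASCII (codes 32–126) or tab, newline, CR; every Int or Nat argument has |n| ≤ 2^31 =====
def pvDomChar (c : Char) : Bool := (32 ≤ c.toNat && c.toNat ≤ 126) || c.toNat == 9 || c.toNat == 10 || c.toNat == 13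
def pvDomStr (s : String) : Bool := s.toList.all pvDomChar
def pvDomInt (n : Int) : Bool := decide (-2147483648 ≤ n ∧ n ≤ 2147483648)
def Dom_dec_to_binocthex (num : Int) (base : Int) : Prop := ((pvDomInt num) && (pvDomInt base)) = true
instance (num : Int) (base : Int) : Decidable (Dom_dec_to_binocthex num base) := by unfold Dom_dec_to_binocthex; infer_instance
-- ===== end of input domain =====

-- B replaces A's while-loop (dict lookup + prepend) by a recursion over the quotient that
-- appends digits most-significant-first, indexing a digit-string literal (objective: simpler).


-- ===== PORT A =====
-- str(hexmap[r]) for r in 0..15; on other r Python raises KeyError (excluded by Pre_), "" here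
def hexmapStr (r : Int) : String :=
  if 0 ≤ r ∧ r ≤ 9 then PySem.Int.toStr r
  else if r = 10 then "A" else if r = 11 then "B" else if r = 12 then "C"
  else if r = 13 then "D" else if r = 14 then "E" else if r = 15 then "F" else ""

-- the while loop; fuel only makes it total (Python diverges for base 1, excluded by Pre_)
def decLoop : Nat → Int → Int → String → String
  | 0, _, _, result => result
  | f + 1, quotient, base, result =>
    if quotient > 0 then
      decLoop f (PySem.Int.floordiv quotient base) base
        (hexmapStr (PySem.Int.mod quotient base) ++ result)
    else result

def dec_to_binocthex (num : Int) (base : Int) : String :=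
  decLoop (num.toNat + 1) num base ""

-- ===== PORT B =====
-- "0123456789ABCDEF"[i]; none = IndexError (excluded by Pre_), "" here
def digitStr (i : Int) : String :=
  match PySem.Str.pyGet? "0123456789ABCDEF" i with
  | some c => String.singleton c
  | none => ""

-- the recursion of Source B; fuel only makes it total (same divergence note as above)
def altGo : Nat → Int → Int → String
  | 0, _, _ => ""
  | f + 1, num, base =>
    if num ≤ 0 then ""
    else altGo f (PySem.Int.floordiv num base) base ++ digitStr (PySem.Int.mod num base)

def dec_to_binocthex_alt (num : Int) (base : Int) : String :=
  altGo (num.toNat + 1) num base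

-- ===== PRECONDITION & SPEC =====
-- Pre_ excludes inputs where A raises or diverges: base 1 (infinite loop) and num > 0 with
-- base ≤ 0 or base > 16 (KeyError on a digit ≥ 16 or a negative remainder); bases > 16 with
-- num < 16 stay inside since every remainder is then < 16.  A few excluded inputs with
-- base > 16 whose digits all happen to be < 16 (e.g. (21, 17)) still return in both programs.
def Pre_dec_to_binocthex (num : Int) (base : Int) : Prop :=
  num ≤ 0 ∨ (2 ≤ base ∧ (base ≤ 16 ∨ num < 16))
instance (num : Int) (base : Int) : Decidable (Pre_dec_to_binocthex num base) := by
  unfold Pre_dec_to_binocthex; infer_instance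

def pvWitness_dec_to_binocthex : Int × Int := (255, 16)

def Spec_dec_to_binocthex (num : Int) (base : Int) (out : String) : Prop := out = dec_to_binocthex_alt num base
instance (num : Int) (base : Int) (out : String) : Decidable (Spec_dec_to_binocthex num base out) := by unfold Spec_dec_to_binocthex; infer_instance

-- ===== CLAIM (what is proved, stated in full; the proofs are below) =====
def Claim_equal_dec_to_binocthex : Prop := ∀ (num : Int) (base : Int), Dom_dec_to_binocthex num base → Pre_dec_to_binocthex num base → Spec_dec_to_binocthex num base (dec_to_binocthex num base)

-- ===== LEMMAS AND PROOFS =====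

-- the two digit renderings agree on 0..15
theorem digit_eq (r : Int) (h0 : 0 ≤ r) (h1 : r < 16) : hexmapStr r = digitStr r := by
  interval_cases r <;> decide

theorem mod_le_self (q b : Int) (hq : 0 < q) (hb : 0 < b) : PySem.Int.mod q b ≤ q := by
  rw [PySem.Int.mod_eq_emod_of_pos hb]
  have h := Int.emod_add_ediv q b
  have : 0 ≤ q / b := Int.ediv_nonneg (by omega) (by omega)
  nlinarith [Int.emod_nonneg q (by omega : b ≠ 0)]

theorem loop_eq_go (f : Nat) : ∀ (q b : Int) (res : String),
    2 ≤ b → (b ≤ 16 ∨ q < 16) → q.toNat < f →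
    decLoop f q b res = altGo f q b ++ res := by
  induction f with
  | zero => intro q b res _ _ h; omega
  | succ f ih =>
    intro q b res hb h16 hf
    by_cases hq : q > 0
    · have hfd_lt : PySem.Int.floordiv q b < q := by
        rw [PySem.Int.floordiv_lt_iff_lt_mul (by omega : (0:Int) < b)]; nlinarith
      have hfd_nn : 0 ≤ PySem.Int.floordiv q b := by
        rw [PySem.Int.le_floordiv_iff_mul_le (by omega : (0:Int) < b)]; omega
      have hmod0 : 0 ≤ PySem.Int.mod q b := PySem.Int.mod_nonneg q (by omega : (0:Int) < b)
      have hmod16 : PySem.Int.mod q b < 16 := by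
        rcases h16 with h | h
        · have := PySem.Int.mod_lt q (by omega : (0:Int) < b); omega
        · have := mod_le_self q b hq (by omega); omega
      have hrec := ih (PySem.Int.floordiv q b) b
        (hexmapStr (PySem.Int.mod q b) ++ res) hb (by omega) (by omega)
      simp only [decLoop, altGo, if_pos hq, if_neg (by omega : ¬ q ≤ 0)]
      rw [hrec, digit_eq _ hmod0 hmod16, String.append_assoc]
    · simp only [decLoop, altGo, if_neg hq, if_pos (by omega : q ≤ 0)]
      simp

-- ===== VERDICT (by name: the statement is the Claim_ definition above) =====
theorem dec_to_binocthex_spec : Claim_equal_dec_to_binocthex := by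
  intro num base _ hpre
  unfold Spec_dec_to_binocthex dec_to_binocthex dec_to_binocthex_alt
  rcases hpre with h | ⟨hb, h16⟩
  · simp [decLoop, altGo, h, show ¬ num > 0 by omega]
  · have := loop_eq_go (num.toNat + 1) num base "" hb h16 (by omega)
    simpa using this
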